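-- pv_equiv track=rewrite | github.com/xymmetry/cps-labs | labs109.py | pancake_scramble
-- ===== SOURCE A (Python) =====
-- def pancake_scramble(text):
--   ttl = len(text)
--   bagel = list(text)
--   x = 0
--   while x < ttl:
--     if x == ttl:
--       return ''.join(bagel)
--     else:
--       start = bagel[:x+1][::-1]
--       moo = bagel[x+1:]
--       bagel = start + moo
--       x+=1
--   else:
--     return ''.join(bagel)
-- ===== SOURCE B (Python) =====
-- def pancake_scramble(text):
--   # One pass: the scramble puts the characters whose index has the same parity
--   # as len(text)-1 first (in descending index order), then the rest ascending.
--   n = len(text)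
--   heads = []
--   tails = []
--   for i, ch in enumerate(text):
--     if (n - 1 - i) % 2 == 0:
--       heads.append(ch)
--     else:
--       tails.append(ch)
--   heads.reverse()
--   return ''.join(heads + tails)
-- ===== Notes on version B (the rewrite author's own statement) =====
-- stated objective: faster
-- what changed: Replaces the loop of successive prefix reversals (each rebuilding the list) by a single pass that splits characters by index parity relative to n-1 and concatenates the two groups (closed-form position of each character).
import Mathlib
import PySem

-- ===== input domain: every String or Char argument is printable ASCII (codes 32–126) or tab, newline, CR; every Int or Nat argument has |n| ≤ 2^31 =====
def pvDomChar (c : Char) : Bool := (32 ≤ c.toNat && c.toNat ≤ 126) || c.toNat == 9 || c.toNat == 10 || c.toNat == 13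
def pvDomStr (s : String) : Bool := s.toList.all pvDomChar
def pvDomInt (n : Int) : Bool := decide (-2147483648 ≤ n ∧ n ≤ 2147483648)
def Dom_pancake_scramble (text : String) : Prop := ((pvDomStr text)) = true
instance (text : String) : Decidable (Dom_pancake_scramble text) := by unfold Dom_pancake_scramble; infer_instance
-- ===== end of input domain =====

-- B replaces A's quadratic loop of prefix reversals by one linear pass splitting characters by index parity.

-- ===== PORT A =====
-- while x < ttl: reverse the prefix of length x+1, x += 1; fuel = remaining iterations (ttl - x)
def pvLoopA (bagel : List Char) (x ttl : Int) : Nat → List Char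
  | 0 => bagel
  | fuel+1 =>
    if x < ttl then
      if x = ttl then bagel  -- dead branch of A, kept for faithfulness
      else
        let start := (PySem.List.slice? (PySem.List.slice bagel none (some (x+1))) none none (-1)).getD []
        let moo := PySem.List.slice bagel (some (x+1)) none
        pvLoopA (start ++ moo) (x+1) ttl fuel
    else bagel

def pancake_scramble (text : String) : String :=
  let ttl : Int := PySem.Str.len text
  let bagel := text.toList
  String.ofList (pvLoopA bagel 0 ttl ttl.toNat)

-- ===== PORT B =====
def pancake_scramble_alt (text : String) : String :=
  let n : Int := PySem.Str.len text
  let p := (PySem.List.enumerate text.toList).foldl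
      (fun (acc : List Char × List Char) ic =>
        if PySem.Int.mod (n - 1 - ic.1) 2 = 0 then (acc.1 ++ [ic.2], acc.2)
        else (acc.1, acc.2 ++ [ic.2])) ([], [])
  String.ofList (p.1.reverse ++ p.2)

-- ===== PRECONDITION & SPEC =====
def Spec_pancake_scramble (text : String) (out : String) : Prop := out = pancake_scramble_alt text
instance (text : String) (out : String) : Decidable (Spec_pancake_scramble text out) := by unfold Spec_pancake_scramble; infer_instance

-- ===== CLAIM (what is proved, stated in full; the proofs are below) =====
def Claim_equal_pancake_scramble : Prop := ∀ (text : String), Dom_pancake_scramble text → Spec_pancake_scramble text (pancake_scramble text)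

-- ===== LEMMAS AND PROOFS =====

-- pvAlt b l: the elements of l whose position k satisfies (k even ↔ b)
def pvAlt {α : Type} : Bool → List α → List α
  | _, [] => []
  | true, c :: t => c :: pvAlt false t
  | false, _ :: t => pvAlt true t

theorem pvAlt_snoc {α : Type} (b : Bool) (l : List α) (c : α) :
    pvAlt b (l ++ [c]) = pvAlt b l ++ (if decide (l.length % 2 = 0) = b then [c] else []) := by
  induction l generalizing b with
  | nil => cases b <;> simp [pvAlt]
  | cons a t ih =>
    by_cases h : t.length % 2 = 0
    · cases b
      · simp [List.cons_append, pvAlt, ih true, decide_eq_true h]; omega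
      · simp [List.cons_append, pvAlt, ih false, decide_eq_true h]; omega
    · cases b
      · simp [List.cons_append, pvAlt, ih true, decide_eq_false h]; omega
      · simp [List.cons_append, pvAlt, ih false, decide_eq_false h]; omega

-- closed form of the fold "u ← c :: u.reverse"
theorem pvFold_closed (l : List Char) :
    l.foldl (fun (u : List Char) c => c :: u.reverse) [] =
      (pvAlt (decide (l.length % 2 = 1)) l).reverse ++ pvAlt (!decide (l.length % 2 = 1)) l := by
  induction l using List.reverseRecOn with
  | nil => simp [pvAlt]
  | append_singleton t c ih =>
    simp only [List.foldl_append, List.foldl_cons, List.foldl_nil, ih, List.length_append,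
      List.length_cons, List.length_nil, Nat.zero_add]
    by_cases hp : t.length % 2 = 0
    · rw [decide_eq_false (by omega : ¬ (t.length % 2 = 1)),
        decide_eq_true (by omega : (t.length + 1) % 2 = 1),
        pvAlt_snoc, pvAlt_snoc, decide_eq_true hp]
      simp
    · rw [decide_eq_true (by omega : t.length % 2 = 1),
        decide_eq_false (by omega : ¬ ((t.length + 1) % 2 = 1)),
        pvAlt_snoc, pvAlt_snoc, decide_eq_false hp]
      simp

-- A's loop is that fold
theorem pvLoopA_eq_fold (v u : List Char) :
    pvLoopA (u ++ v) (u.length : Int) ((u.length + v.length : Nat) : Int) v.length =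
      v.foldl (fun (u : List Char) c => c :: u.reverse) u := by
  induction v generalizing u with
  | nil => simp [pvLoopA]
  | cons c v' ih =>
    have hx : (u.length : Int) < ((u.length + (v'.length + 1) : Nat) : Int) := by
      push_cast; omega
    have hne : ¬ ((u.length : Int) = ((u.length + (v'.length + 1) : Nat) : Int)) := by
      push_cast; omega
    simp only [List.length_cons, pvLoopA]
    rw [if_pos hx, if_neg hne]
    rw [show (u.length : Int) + 1 = ((u.length + 1 : Nat) : Int) by push_cast; ring]
    rw [PySem.List.slice_to_natCast, PySem.List.slice_from_natCast,
      PySem.List.slice?_none_none_neg_one]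
    have htake : (u ++ c :: v').take (u.length + 1) = u ++ [c] := by
      simp [List.take_append]
    have hdrop : (u ++ c :: v').drop (u.length + 1) = v' := by
      simp [List.drop_append]
    rw [htake, hdrop, Option.getD_some]
    have harr : ((u ++ [c]).reverse) = c :: u.reverse := by simp
    rw [harr]
    have e1 : ((u.length + 1 : Nat) : Int) = ((c :: u.reverse).length : Int) := by simp
    have e2 : ((u.length + (v'.length + 1) : Nat) : Int) =
        (((c :: u.reverse).length + v'.length : Nat) : Int) := by push_cast; simp; omega
    rw [e1, e2, ih (c :: u.reverse), List.foldl_cons]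

-- B's enumerate fold splits l into the two parity classes
theorem pvEnumFold_eq (n : Int) (l : List Char) :
    ∀ (s : Int) (h t : List Char),
      (PySem.List.enumerate l s).foldl
        (fun (acc : List Char × List Char) ic =>
          if PySem.Int.mod (n - 1 - ic.1) 2 = 0 then (acc.1 ++ [ic.2], acc.2)
          else (acc.1, acc.2 ++ [ic.2])) (h, t) =
      (h ++ pvAlt (decide (PySem.Int.mod (n - 1 - s) 2 = 0)) l,
       t ++ pvAlt (!decide (PySem.Int.mod (n - 1 - s) 2 = 0)) l) := by
  induction l with
  | nil => intro s h t; simp [PySem.List.enumerate_nil, pvAlt]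
  | cons c l' ih =>
    intro s h t
    have hflip : PySem.Int.mod (n - 1 - (s + 1)) 2 = 0 ↔ ¬ PySem.Int.mod (n - 1 - s) 2 = 0 := by
      rw [PySem.Int.mod_eq_emod_of_pos (by omega : (0:Int) < 2),
        PySem.Int.mod_eq_emod_of_pos (by omega : (0:Int) < 2)]
      omega
    rw [PySem.List.enumerate_cons]
    simp only [List.foldl_cons]
    by_cases hc : PySem.Int.mod (n - 1 - s) 2 = 0
    · rw [if_pos hc, ih (s + 1) (h ++ [c]) t,
        decide_eq_true hc, decide_eq_false (fun hx => (hflip.mp hx) hc)]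
      simp [pvAlt]
    · rw [if_neg hc, ih (s + 1) h (t ++ [c]),
        decide_eq_true (hflip.mpr hc), decide_eq_false hc]
      simp [pvAlt]

-- ===== VERDICT (by name: the statement is the Claim_ definition above) =====
theorem pancake_scramble_spec : Claim_equal_pancake_scramble := by
  intro text _
  show pancake_scramble text = pancake_scramble_alt text
  unfold pancake_scramble pancake_scramble_alt
  set l := text.toList with hl
  have hlen : PySem.Str.len text = (l.length : Int) := by
    simp [PySem.Str.len_eq, hl]
  simp only [hlen, Int.toNat_natCast]
  have hA := pvLoopA_eq_fold l []
  simp only [List.nil_append, List.length_nil, Nat.zero_add, Int.natCast_zero] at hA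
  rw [hA, pvFold_closed]
  rw [pvEnumFold_eq (l.length : Int) l 0 [] []]
  have hb : (decide (PySem.Int.mod ((l.length : Int) - 1 - 0) 2 = 0)) =
      (decide (l.length % 2 = 1)) := by
    rw [decide_eq_decide, PySem.Int.mod_eq_emod_of_pos (by omega : (0:Int) < 2)]
    omega
  rw [hb]
  simp
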